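-- pv_equiv track=rewrite | github.com/AlejandroBeltranA/local_token_expansion | docs/figures/generate_scaffold_path.py | detect_backend
-- ===== SOURCE A (Python) =====
-- def detect_backend(model_name: str, default: str = "unknown") -> str:
--     n = model_name.lower()
--     if any(k in n for k in ("gpt", "openai", "o1", "o3")):
--         return "openai"
--     if any(k in n for k in ("claude", "haiku", "sonnet", "opus")):
--         return "anthropic"
--     if "gemini" in n:
--         return "google"
--     return default
-- ===== SOURCE B (Python) =====
-- _KEYWORD_VENDOR = {
--     "gpt": "openai", "openai": "openai", "o1": "openai", "o3": "openai",
--     "claude": "anthropic", "haiku": "anthropic", "sonnet": "anthropic", "opus": "anthropic",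
--     "gemini": "google",
-- }
-- _PRIORITY = ("openai", "anthropic", "google")
--
--
-- def detect_backend(model_name: str, default: str = "unknown") -> str:
--     # one left-to-right scan of the name matching all keywords at each position,
--     # collecting every vendor that occurs; then resolve by fixed priority
--     n = model_name.lower()
--     found = set()
--     for i in range(len(n)):
--         for k, v in _KEYWORD_VENDOR.items():
--             if n.startswith(k, i):
--                 found.add(v)
--     for v in _PRIORITY:
--         if v in found:
--             return v
--     return default
-- ===== Notes on version B (the rewrite author's own statement) =====
-- stated objective: alternative
-- what changed: Instead of A's per-vendor if-chain of substring tests, B makes one positional scan of the lowercased name matching all keywords at each offset, collects every matched vendor into a set, and then resolves by a fixed vendor-priority list.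
import Mathlib
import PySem

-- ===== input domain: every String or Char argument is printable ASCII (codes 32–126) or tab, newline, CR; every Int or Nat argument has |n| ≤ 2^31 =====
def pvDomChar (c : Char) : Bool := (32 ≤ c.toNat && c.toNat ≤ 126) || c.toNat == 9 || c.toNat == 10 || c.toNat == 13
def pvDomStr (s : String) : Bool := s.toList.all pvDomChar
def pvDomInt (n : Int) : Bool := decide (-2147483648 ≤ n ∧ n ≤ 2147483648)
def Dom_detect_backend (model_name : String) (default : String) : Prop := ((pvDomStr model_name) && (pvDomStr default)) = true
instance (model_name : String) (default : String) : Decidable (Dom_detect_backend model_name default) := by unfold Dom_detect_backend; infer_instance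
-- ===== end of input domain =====

-- B replaces A's per-vendor if-chain by one positional scan of the name that collects every matched vendor into a set, then resolves by fixed priority; same behaviour ("alternative").


-- ===== PORT A =====
def detect_backend (model_name : String) (default : String) : String :=
  let n := PySem.Str.lower model_name
  if ["gpt", "openai", "o1", "o3"].any (fun k => PySem.Str.isIn k n) then "openai"
  else if ["claude", "haiku", "sonnet", "opus"].any (fun k => PySem.Str.isIn k n) then "anthropic"
  else if PySem.Str.isIn "gemini" n then "google"
  else default

-- ===== PORT B =====
-- keyword → vendor table (Python's _KEYWORD_VENDOR dict, in insertion order)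
def pvKeywordVendor : List (List Char × String) :=
  [("gpt".toList, "openai"), ("openai".toList, "openai"), ("o1".toList, "openai"), ("o3".toList, "openai"),
   ("claude".toList, "anthropic"), ("haiku".toList, "anthropic"), ("sonnet".toList, "anthropic"),
   ("opus".toList, "anthropic"), ("gemini".toList, "google")]

def pvPriority : List String := ["openai", "anthropic", "google"]

-- the scan loop: for i in range(len(n)): for k, v in _KEYWORD_VENDOR.items(): if n.startswith(k, i): found.add(v)
def pvFound (n : List Char) : PySem.Set String :=
  (PySem.List.pyRange 0 n.length 1).foldl
    (fun acc i =>
      pvKeywordVendor.foldl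
        (fun acc2 kv => if kv.1.isPrefixOf (n.drop i.toNat) then PySem.Set.add acc2 kv.2 else acc2)
        acc)
    PySem.Set.empty

-- the priority loop: for v in _PRIORITY: if v in found: return v; return default
def pvPick (found : PySem.Set String) (default : String) : List String → String
  | [] => default
  | v :: rest => if PySem.Set.contains found v then v else pvPick found default rest

def detect_backend_alt (model_name : String) (default : String) : String :=
  pvPick (pvFound (PySem.Str.lower model_name).toList) default pvPriority

-- ===== PRECONDITION & SPEC =====
def Spec_detect_backend (model_name : String) (default : String) (out : String) : Prop := out = detect_backend_alt model_name default
instance (model_name : String) (default : String) (out : String) : Decidable (Spec_detect_backend model_name default out) := by unfold Spec_detect_backend; infer_instance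

-- ===== CLAIM (what is proved, stated in full; the proofs are below) =====
def Claim_equal_detect_backend : Prop := ∀ (model_name : String) (default : String), Dom_detect_backend model_name default → Spec_detect_backend model_name default (detect_backend model_name default)

-- ===== LEMMAS AND PROOFS =====

-- membership in the inner (keyword) fold
theorem pv_mem_inner (d : List Char) (kvs : List (List Char × String)) (acc : PySem.Set String) (v : String) :
    (v ∈ kvs.foldl (fun acc2 kv => if kv.1.isPrefixOf d then PySem.Set.add acc2 kv.2 else acc2) acc) ↔
      v ∈ acc ∨ ∃ kv ∈ kvs, kv.1.isPrefixOf d = true ∧ kv.2 = v := by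
  induction kvs generalizing acc with
  | nil => simp
  | cons kv rest ih =>
    simp only [List.foldl_cons, ih, List.mem_cons]
    split
    · rename_i h
      simp only [PySem.Set.mem_add]
      constructor
      · rintro (( hs | he) | ⟨kv', hkv', hp, hv⟩)
        · exact Or.inl hs
        · exact Or.inr ⟨kv, Or.inl rfl, h, he.symm⟩
        · exact Or.inr ⟨kv', Or.inr hkv', hp, hv⟩
      · rintro (hs | ⟨kv', (rfl | hkv'), hp, hv⟩)
        · exact Or.inl (Or.inl hs)
        · exact Or.inl (Or.inr hv.symm)
        · exact Or.inr ⟨kv', hkv', hp, hv⟩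
    · rename_i h
      constructor
      · rintro (hs | ⟨kv', hkv', hp, hv⟩)
        · exact Or.inl hs
        · exact Or.inr ⟨kv', Or.inr hkv', hp, hv⟩
      · rintro (hs | ⟨kv', (rfl | hkv'), hp, hv⟩)
        · exact Or.inl hs
        · exact absurd hp h
        · exact Or.inr ⟨kv', hkv', hp, hv⟩

-- membership in the outer (position) fold
theorem pv_mem_outer (n : List Char) (l : List Int) (acc : PySem.Set String) (v : String) :
    (v ∈ l.foldl (fun acc i => pvKeywordVendor.foldl
        (fun acc2 kv => if kv.1.isPrefixOf (n.drop i.toNat) then PySem.Set.add acc2 kv.2 else acc2) acc) acc) ↔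
      v ∈ acc ∨ ∃ i ∈ l, ∃ kv ∈ pvKeywordVendor, kv.1.isPrefixOf (n.drop i.toNat) = true ∧ kv.2 = v := by
  induction l generalizing acc with
  | nil => simp
  | cons i rest ih =>
    simp only [List.foldl_cons, ih, pv_mem_inner, List.mem_cons]
    constructor
    · rintro ((hs | ⟨kv, hkv, hp, hv⟩) | ⟨i', hi', kv, hkv, hp, hv⟩)
      · exact Or.inl hs
      · exact Or.inr ⟨i, Or.inl rfl, kv, hkv, hp, hv⟩
      · exact Or.inr ⟨i', Or.inr hi', kv, hkv, hp, hv⟩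
    · rintro (hs | ⟨i', (rfl | hi'), kv, hkv, hp, hv⟩)
      · exact Or.inl (Or.inl hs)
      · exact Or.inl (Or.inr ⟨kv, hkv, hp, hv⟩)
      · exact Or.inr ⟨i', hi', kv, hkv, hp, hv⟩

-- a nonempty keyword that occurs anywhere in n occurs at a position scanned by the loop
theorem pv_exists_pos_iff_isIn (k n : List Char) (hk : k ≠ []) :
    (∃ i ∈ PySem.List.pyRange 0 n.length 1, k.isPrefixOf (n.drop i.toNat) = true) ↔
      PySem.Chars.isIn k n = true := by
  rw [← PySem.Chars.exists_prefix_drop_iff_isIn]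
  constructor
  · rintro ⟨i, _, hp⟩
    exact ⟨i.toNat, List.isPrefixOf_iff_prefix.mp hp⟩
  · rintro ⟨j, hp⟩
    have hlen : k.length ≤ (n.drop j).length := hp.length_le
    have hj : j < n.length := by
      rw [List.length_drop] at hlen
      have : 0 < k.length := List.length_pos_iff.mpr hk
      omega
    refine ⟨(j : Int), ?_, ?_⟩
    · rw [PySem.List.mem_pyRange_one]; omega
    · simpa using List.isPrefixOf_iff_prefix.mpr hp

-- vendor membership in the found set, as a disjunction of Python 'in' checks
theorem pv_mem_found (n : List Char) (v : String) :
    v ∈ pvFound n ↔ ∃ kv ∈ pvKeywordVendor, PySem.Chars.isIn kv.1 n = true ∧ kv.2 = v := by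
  unfold pvFound
  rw [pv_mem_outer]
  constructor
  · rintro (hs | ⟨i, hi, kv, hkv, hp, hv⟩)
    · simp [PySem.Set.empty] at hs
    · refine ⟨kv, hkv, ?_, hv⟩
      have hk : kv.1 ≠ [] := by
        fin_cases hkv <;> simp
      exact (pv_exists_pos_iff_isIn kv.1 n hk).mp ⟨i, hi, hp⟩
  · rintro ⟨kv, hkv, hin, hv⟩
    have hk : kv.1 ≠ [] := by fin_cases hkv <;> simp
    obtain ⟨i, hi, hp⟩ := (pv_exists_pos_iff_isIn kv.1 n hk).mpr hin
    exact Or.inr ⟨i, hi, kv, hkv, hp, hv⟩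

-- ===== VERDICT (by name: the statement is the Claim_ definition above) =====
theorem detect_backend_spec : Claim_equal_detect_backend := by
  intro model_name default _
  unfold Spec_detect_backend detect_backend detect_backend_alt
  set n := (PySem.Str.lower model_name).toList with hn
  have hmem : ∀ v, PySem.Set.contains (pvFound n) v = true ↔
      ∃ kv ∈ pvKeywordVendor, PySem.Chars.isIn kv.1 n = true ∧ kv.2 = v := by
    intro v; rw [PySem.Set.contains_iff, pv_mem_found]
  have hA : ∀ k : String, PySem.Str.isIn k (PySem.Str.lower model_name) = PySem.Chars.isIn k.toList n := by
    intro k; simp [PySem.Str.isIn, hn]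
  simp only [pvPick, pvPriority, List.any_cons, List.any_nil, Bool.or_false, hA]
  by_cases h1 : PySem.Set.contains (pvFound n) "openai" = true
  · obtain ⟨kv, hkv, hin, hv⟩ := (hmem _).mp h1
    fin_cases hkv <;> simp_all [pvKeywordVendor]
  · have h1' : ∀ k ∈ (["gpt", "openai", "o1", "o3"] : List String),
        PySem.Chars.isIn k.toList n = false := by
      intro k hk
      by_contra hc
      exact h1 ((hmem "openai").mpr ⟨(k.toList, "openai"), by fin_cases hk <;> simp [pvKeywordVendor],
        by simpa using hc, rfl⟩)
    have e1 := h1' "gpt" (by simp); have e2 := h1' "openai" (by simp)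
    have e3 := h1' "o1" (by simp); have e4 := h1' "o3" (by simp)
    rw [e1, e2, e3, e4, if_neg h1]
    simp only [Bool.or_self, Bool.false_eq_true, if_false]
    by_cases h2 : PySem.Set.contains (pvFound n) "anthropic" = true
    · obtain ⟨kv, hkv, hin, hv⟩ := (hmem _).mp h2
      fin_cases hkv <;> simp_all [pvKeywordVendor]
    · have h2' : ∀ k ∈ (["claude", "haiku", "sonnet", "opus"] : List String),
          PySem.Chars.isIn k.toList n = false := by
        intro k hk
        by_contra hc
        exact h2 ((hmem "anthropic").mpr ⟨(k.toList, "anthropic"), by fin_cases hk <;> simp [pvKeywordVendor],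
          by simpa using hc, rfl⟩)
      have f1 := h2' "claude" (by simp); have f2 := h2' "haiku" (by simp)
      have f3 := h2' "sonnet" (by simp); have f4 := h2' "opus" (by simp)
      rw [f1, f2, f3, f4, if_neg h2]
      simp only [Bool.or_self, Bool.false_eq_true, if_false]
      by_cases h3 : PySem.Set.contains (pvFound n) "google" = true
      · obtain ⟨kv, hkv, hin, hv⟩ := (hmem _).mp h3
        fin_cases hkv <;> simp_all [pvKeywordVendor]
      · have h3' : PySem.Chars.isIn "gemini".toList n = false := by
          by_contra hc
          exact h3 ((hmem "google").mpr ⟨("gemini".toList, "google"), by simp [pvKeywordVendor],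
            by simpa using hc, rfl⟩)
        rw [h3', if_neg h3]
        simp
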